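-- pv_equiv track=rewrite | github.com/vgkz/AdventOfCode2025 | day2/day2part2.py | checkValidity
-- ===== SOURCE A (Python) =====
-- def checkValidity(inputId : str) -> bool:
--     idLen = len(inputId)
--     sequencesToCheck = [inputId[:i] for i in range(1,idLen//2+1)]
--     for seq in sequencesToCheck:
--         splitId = inputId.split(seq)
--         if len([split for split in splitId if split != ""]) == 0:
--             return False
--     return True
-- ===== SOURCE B (Python) =====
-- def checkValidity(inputId: str) -> bool:
--     n = len(inputId)
--     for i in range(1, n // 2 + 1):
--         if n % i == 0 and inputId == inputId[:i] * (n // i):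
--             return False
--     return True
-- ===== Notes on version B (the rewrite author's own statement) =====
-- stated objective: faster
-- what changed: Instead of splitting the string on every prefix of length up to n//2, B checks only prefix lengths that divide n and compares the string directly with that prefix repeated n//i times.
import Mathlib
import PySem

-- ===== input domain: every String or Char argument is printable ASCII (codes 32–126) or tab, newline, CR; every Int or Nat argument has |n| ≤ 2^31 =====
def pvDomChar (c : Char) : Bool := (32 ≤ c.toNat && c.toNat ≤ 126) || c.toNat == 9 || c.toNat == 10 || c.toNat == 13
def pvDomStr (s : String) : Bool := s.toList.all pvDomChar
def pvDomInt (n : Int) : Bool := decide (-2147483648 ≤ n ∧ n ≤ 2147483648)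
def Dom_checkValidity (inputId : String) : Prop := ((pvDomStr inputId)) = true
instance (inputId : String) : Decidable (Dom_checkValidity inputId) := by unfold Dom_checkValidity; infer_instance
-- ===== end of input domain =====

-- B replaces A's split-on-every-prefix scan by a divisor test (only prefix lengths dividing n,
-- compared with the repeated prefix directly): measurably faster; return value proved equal on all inputs.

-- ===== PORT A =====
-- the for-loop over sequencesToCheck with its early 'return False'
def checkValidityGo (inputId : String) : List String → Bool
  | [] => true
  | seq :: rest =>
    -- seq here is always a nonempty prefix of a nonempty inputId, so split? is never none (Python never raises)
    let splitId := (PySem.Str.split? inputId seq).getD []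
    if ((splitId.filter (fun split => split != "")).length == 0) then false
    else checkValidityGo inputId rest

def checkValidity (inputId : String) : Bool :=
  let idLen := PySem.Str.len inputId
  let sequencesToCheck := (PySem.List.pyRange 1 (PySem.Int.floordiv idLen 2 + 1) 1).map
    (fun i => PySem.Str.slice inputId none (some i))
  checkValidityGo inputId sequencesToCheck

-- ===== PORT B =====
-- s * k for a Python string: k concatenated copies (exact for k ≥ 0; Source B only uses k ≥ 2)
def strRepeat (s : String) (k : Int) : String :=
  String.ofList ((List.replicate k.toNat s.toList).flatten)

-- the for-loop over range(1, n//2+1) with its early 'return False'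
def checkValidityAltGo (inputId : String) (n : Int) : List Int → Bool
  | [] => true
  | i :: rest =>
    if (PySem.Int.mod n i == 0 &&
        inputId == strRepeat (PySem.Str.slice inputId none (some i)) (PySem.Int.floordiv n i)) then false
    else checkValidityAltGo inputId n rest

def checkValidity_alt (inputId : String) : Bool :=
  let n := PySem.Str.len inputId
  checkValidityAltGo inputId n (PySem.List.pyRange 1 (PySem.Int.floordiv n 2 + 1) 1)

-- ===== PRECONDITION & SPEC =====
def Spec_checkValidity (inputId : String) (out : Bool) : Prop := out = checkValidity_alt inputId
instance (inputId : String) (out : Bool) : Decidable (Spec_checkValidity inputId out) := by unfold Spec_checkValidity; infer_instance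

-- ===== CLAIM (what is proved, stated in full; the proofs are below) =====
def Claim_equal_checkValidity : Prop := ∀ (inputId : String), Dom_checkValidity inputId → Spec_checkValidity inputId (checkValidity inputId)

-- ===== LEMMAS AND PROOFS =====

-- l is a concatenation of (zero or more) copies of sep
def Tiled (l sep : List Char) : Prop := ∃ k : Nat, l = (List.replicate k sep).flatten

lemma tiled_cons_iff {l sep : List Char} (hl : l ≠ []) :
    Tiled l sep ↔ sep.isPrefixOf l = true ∧ Tiled (l.drop sep.length) sep := by
  constructor
  · rintro ⟨k, rfl⟩
    cases k with
    | zero => simp at hl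
    | succ k =>
      simp only [List.replicate_succ, List.flatten_cons]
      refine ⟨?_, k, ?_⟩
      · exact List.isPrefixOf_iff_prefix.mpr ⟨_, rfl⟩
      · rw [List.drop_left]
  · rintro ⟨hp, k, hd⟩
    obtain ⟨rest, rfl⟩ := List.isPrefixOf_iff_prefix.mp hp
    rw [List.drop_left] at hd
    exact ⟨k + 1, by simp [List.replicate_succ, hd]⟩

lemma go_acc (sep : List Char) : ∀ (fuel : Nat) (l cur : List Char) (acc : List (List Char)),
    PySem.Chars.splitOn.go sep fuel l cur acc =
      acc.reverse ++ PySem.Chars.splitOn.go sep fuel l cur [] := by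
  intro fuel
  induction fuel with
  | zero => intro l cur acc; rw [PySem.Chars.splitOn.go.eq_def, PySem.Chars.splitOn.go.eq_def]; cases l <;> simp
  | succ fuel ih =>
    intro l cur acc
    cases l with
    | nil => rw [PySem.Chars.splitOn.go.eq_def, PySem.Chars.splitOn.go.eq_def]; simp
    | cons c rest =>
      rw [PySem.Chars.splitOn.go.eq_def]
      conv_rhs => rw [PySem.Chars.splitOn.go.eq_def]
      simp only
      by_cases hp : sep.isPrefixOf (c :: rest) = true
      · simp only [hp, if_true]
        rw [ih _ _ (cur.reverse :: acc), ih _ _ [cur.reverse]]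
        simp
      · simp only [hp, if_false, Bool.false_eq_true]
        exact ih _ _ acc

lemma go_all_empty (sep : List Char) (hsep : sep ≠ []) :
    ∀ (fuel : Nat) (l cur : List Char), l.length < fuel →
    ((PySem.Chars.splitOn.go sep fuel l cur []).all (fun p => p.isEmpty) = true ↔
      (cur = [] ∧ Tiled l sep)) := by
  intro fuel
  induction fuel with
  | zero => intro l cur h; omega
  | succ fuel ih =>
    intro l cur h
    cases l with
    | nil =>
      rw [PySem.Chars.splitOn.go.eq_def]
      simp only [List.reverse_cons, List.reverse_nil, List.nil_append, List.all_cons, List.all_nil,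
        Bool.and_true, List.isEmpty_iff, List.reverse_eq_nil_iff]
      exact ⟨fun hc => ⟨hc, 0, rfl⟩, fun hc => hc.1⟩
    | cons c rest =>
      rw [PySem.Chars.splitOn.go.eq_def]
      simp only
      by_cases hp : sep.isPrefixOf (c :: rest) = true
      · simp only [hp, if_true]
        rw [go_acc]
        have hdl : (List.drop sep.length (c :: rest)).length < fuel := by
          have : 1 ≤ sep.length := List.length_pos_iff.mpr hsep
          simp only [List.length_drop, List.length_cons] at *
          omega
        rw [List.all_append]
        simp only [List.reverse_cons, List.reverse_nil, List.nil_append, List.all_cons,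
          List.all_nil, Bool.and_true, List.isEmpty_iff, List.reverse_eq_nil_iff,
          Bool.and_eq_true]
        rw [ih _ [] hdl]
        rw [tiled_cons_iff (List.cons_ne_nil c rest)]
        constructor
        · rintro ⟨hc, -, ht⟩; exact ⟨hc, hp, ht⟩
        · rintro ⟨hc, -, ht⟩; exact ⟨hc, rfl, ht⟩
      · simp only [hp, if_false, Bool.false_eq_true]
        rw [ih rest (c :: cur) (by simp at h ⊢; omega)]
        rw [tiled_cons_iff (List.cons_ne_nil c rest)]
        constructor
        · rintro ⟨hc, -⟩; exact absurd hc (List.cons_ne_nil c cur)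
        · rintro ⟨-, hpp, -⟩; exact absurd hpp hp

lemma splitOn_all_empty (l sep : List Char) (hsep : sep ≠ []) :
    ((PySem.Chars.splitOn l sep).all (fun p => p.isEmpty) = true ↔ Tiled l sep) := by
  rw [PySem.Chars.splitOn.eq_1]
  rw [go_all_empty sep hsep (l.length + 1) l [] (by omega)]
  simp

lemma tiled_iff_pow (l sep : List Char) (hsep : sep ≠ []) :
    Tiled l sep ↔ (sep.length ∣ l.length ∧
      l = (List.replicate (l.length / sep.length) sep).flatten) := by
  have hpos : 0 < sep.length := List.length_pos_iff.mpr hsep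
  constructor
  · rintro ⟨k, rfl⟩
    have hlen : ((List.replicate k sep).flatten).length = k * sep.length := by
      simp [List.length_flatten, List.map_replicate, List.sum_replicate, smul_eq_mul]
    rw [hlen]
    refine ⟨dvd_mul_left sep.length k, ?_⟩
    rw [Nat.mul_div_cancel k hpos]
  · rintro ⟨-, h⟩
    exact ⟨_, h⟩

-- the Bool loop conditions, as functions of the prefix length i
def condA (s : String) (i : Int) : Bool :=
  ((((PySem.Str.split? s (PySem.Str.slice s none (some i))).getD []).filter
      (fun split => split != "")).length == 0)

def condB (s : String) (i : Int) : Bool :=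
  (PySem.Int.mod (PySem.Str.len s) i == 0 &&
    s == strRepeat (PySem.Str.slice s none (some i)) (PySem.Int.floordiv (PySem.Str.len s) i))

lemma loops_eq (s : String) : ∀ is_ : List Int, (∀ i ∈ is_, condA s i = condB s i) →
    checkValidityGo s (is_.map (fun i => PySem.Str.slice s none (some i))) =
      checkValidityAltGo s (PySem.Str.len s) is_ := by
  intro is_
  induction is_ with
  | nil => intro _; rfl
  | cons i rest ih =>
    intro h
    have hi := h i (List.mem_cons_self)
    simp only [List.map_cons]
    rw [checkValidityGo, checkValidityAltGo]
    rw [show ((((PySem.Str.split? s (PySem.Str.slice s none (some i))).getD []).filter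
      (fun split => split != "")).length == 0) = condA s i from rfl]
    rw [hi, condB]
    by_cases hb : (PySem.Int.mod (PySem.Str.len s) i == 0 &&
        s == strRepeat (PySem.Str.slice s none (some i)) (PySem.Int.floordiv (PySem.Str.len s) i)) = true
    · rw [if_pos hb, if_pos hb]
    · rw [if_neg hb, if_neg hb]
      exact ih (fun j hj => h j (List.mem_cons_of_mem _ hj))

lemma string_eq_iff_toList (s t : String) : s = t ↔ s.toList = t.toList := by
  constructor
  · intro h; rw [h]
  · intro h
    have := congrArg String.ofList h
    simpa using this

lemma cond_eq (s : String) (i : Int) (h1 : 1 ≤ i)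
    (h2 : i ≤ PySem.Int.floordiv (PySem.Str.len s) 2) : condA s i = condB s i := by
  set cs := s.toList with hcs
  have hm : PySem.Str.len s = (cs.length : Int) := by simp [PySem.Str.len_eq, hcs]
  set m := cs.length with hmdef
  set t := i.toNat with ht
  have hit : i = (t : Int) := by omega
  have hfd : PySem.Int.floordiv (m : Int) 2 = ((m / 2 : Nat) : Int) := by
    exact_mod_cast PySem.Int.floordiv_natCast m 2
  have h2' : 2 * t ≤ m := by
    rw [hm, hfd, hit] at h2
    have : t ≤ m / 2 := by exact_mod_cast h2
    omega
  have ht1 : 1 ≤ t := by omega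
  -- the prefix
  have hslice : (PySem.Str.slice s none (some i)).toList = cs.take t := by
    simp only [PySem.Str.slice, String.toList_ofList]
    rw [hit]
    exact_mod_cast PySem.List.slice_to_natCast cs t
  have hplen : (cs.take t).length = t := by
    simp only [List.length_take]
    omega
  have hpne : cs.take t ≠ [] := by
    intro hh
    have := congrArg List.length hh
    simp [hplen] at this
    omega
  have hpneS : PySem.Str.slice s none (some i) ≠ "" := by
    intro hh
    apply hpne
    rw [← hslice, hh]
    rfl
  -- condA ↔ Tiled cs (cs.take t)
  have hsplit : PySem.Str.split? s (PySem.Str.slice s none (some i)) =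
      some ((PySem.Chars.splitOn cs (cs.take t)).map String.ofList) := by
    rw [PySem.Str.split?.eq_1, PySem.Chars.split?.eq_1]
    rw [hslice]
    simp [List.isEmpty_iff, hpne, ← hcs]
  have hA : condA s i = true ↔ Tiled cs (cs.take t) := by
    rw [condA, hsplit]
    rw [← splitOn_all_empty cs (cs.take t) hpne]
    simp only [Option.getD_some, beq_iff_eq, List.length_eq_zero_iff, List.filter_eq_nil_iff]
    rw [List.all_eq_true]
    constructor
    · intro h p hp
      have := h (String.ofList p) (List.mem_map_of_mem hp)
      simp only [bne_iff_ne, ne_eq, Decidable.not_not] at this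
      have hpz : p = [] := by have := congrArg String.toList this; simpa using this
      simp [hpz]
    · intro h x hx
      obtain ⟨p, hp, rfl⟩ := List.mem_map.mp hx
      have := h p hp
      simp only [List.isEmpty_iff] at this
      simp [this]
  -- condB ↔ divisor form
  have hBrep : (strRepeat (PySem.Str.slice s none (some i)) (PySem.Int.floordiv (PySem.Str.len s) i)).toList
      = (List.replicate (m / t) (cs.take t)).flatten := by
    simp only [strRepeat, String.toList_ofList, hslice]
    congr 2
    rw [hm, hit]
    rw [show PySem.Int.floordiv ((m : Int)) ((t : Int)) = ((m / t : Nat) : Int) from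
      by exact_mod_cast PySem.Int.floordiv_natCast m t]
    exact Int.toNat_natCast _
  have hmod : PySem.Int.mod (PySem.Str.len s) i = ((m % t : Nat) : Int) := by
    rw [hm, hit]
    exact_mod_cast PySem.Int.mod_natCast m t
  have hB : condB s i = true ↔ (t ∣ m ∧ cs = (List.replicate (m / t) (cs.take t)).flatten) := by
    rw [condB, Bool.and_eq_true, hmod]
    constructor
    · rintro ⟨hd, he⟩
      have hd' : (m % t : Nat) = 0 := by exact_mod_cast beq_iff_eq.mp hd
      refine ⟨Nat.dvd_of_mod_eq_zero hd', ?_⟩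
      have he' := beq_iff_eq.mp he
      rw [string_eq_iff_toList] at he'
      rw [← hcs, hBrep] at he'
      exact he'
    · rintro ⟨hd, he⟩
      refine ⟨?_, ?_⟩
      · have hz : (m % t : Nat) = 0 := Nat.mod_eq_zero_of_dvd hd
        exact beq_iff_eq.mpr (by exact_mod_cast hz)
      · apply beq_iff_eq.mpr
        rw [string_eq_iff_toList, ← hcs, hBrep]
        exact he
  have hT : Tiled cs (cs.take t) ↔ (t ∣ m ∧ cs = (List.replicate (m / t) (cs.take t)).flatten) := by
    rw [tiled_iff_pow cs (cs.take t) hpne, hplen]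
  have hiff : condA s i = true ↔ condB s i = true := hA.trans (hT.trans hB.symm)
  exact Bool.coe_iff_coe.mp hiff

-- ===== VERDICT (by name: the statement is the Claim_ definition above) =====
theorem checkValidity_spec : Claim_equal_checkValidity := by
  unfold Claim_equal_checkValidity Spec_checkValidity
  intro s _
  simp only [checkValidity, checkValidity_alt]
  refine loops_eq s _ (fun i hi => ?_)
  obtain ⟨ha, hb⟩ := PySem.List.mem_pyRange_one.mp hi
  exact cond_eq s i ha (by omega)
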